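-- pv_equiv track=rewrite | github.com/rami-droid/inf100 | lab6/dna_fragment_match.py | best_alignment
-- ===== SOURCE A (Python) =====
-- def best_alignment(genome, sequence):
--     seq_length = len(sequence)
--     best_index = -1
--     fewest_mismatches = float('inf')
--
--     for i in range(len(genome) - seq_length + 1):
--         window = genome[i:i+seq_length]
--         mismatches = 0
--         for j, char in enumerate(window):
--             if char != sequence[j]:
--                 mismatches += 1
--         if mismatches < fewest_mismatches:
--             fewest_mismatches = mismatches
--             best_index = i
--     return best_index
-- ===== SOURCE B (Python) =====
-- def best_alignment(genome, sequence):
--     m = len(sequence)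
--     n_windows = len(genome) - m + 1
--     if n_windows <= 0:
--         return -1
--     counts = [0] * n_windows
--     for j, c in enumerate(sequence):
--         for i in range(n_windows):
--             if genome[i + j] != c:
--                 counts[i] += 1
--     best = 0
--     for i in range(1, n_windows):
--         if counts[i] < counts[best]:
--             best = i
--     return best
-- ===== Notes on version B (the rewrite author's own statement) =====
-- stated objective: alternative
-- what changed: B transposes the loops: it builds a per-window mismatch-count array column-by-column over sequence positions (no window slicing, no running best/fewest pair) and then does a separate first-argmin scan over the counts.
import Mathlib
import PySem

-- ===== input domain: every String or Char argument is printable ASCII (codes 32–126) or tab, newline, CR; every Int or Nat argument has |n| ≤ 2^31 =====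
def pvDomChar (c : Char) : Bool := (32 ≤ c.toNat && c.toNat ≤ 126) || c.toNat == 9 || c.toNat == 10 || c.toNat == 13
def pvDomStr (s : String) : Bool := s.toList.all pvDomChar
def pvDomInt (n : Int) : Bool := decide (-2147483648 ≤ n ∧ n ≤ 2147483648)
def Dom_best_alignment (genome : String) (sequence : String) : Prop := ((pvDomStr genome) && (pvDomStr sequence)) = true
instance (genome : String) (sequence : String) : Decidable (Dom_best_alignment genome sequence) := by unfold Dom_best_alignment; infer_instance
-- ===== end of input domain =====

-- B replaces A's per-window slicing and running (best, fewest) pair by a transposed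
-- traversal: a mismatch-count array built column-by-column over sequence positions,
-- then a first-argmin scan (objective: alternative; same asymptotic cost).

-- ===== PORT A =====
-- inner loop of A: 'for j, char in enumerate(window): if char != sequence[j]: mismatches += 1'
def pvAMism (s : List Char) (window : List Char) : Int :=
  (PySem.List.enumerate window 0).foldl
    (fun mismatches jc =>
      if some jc.2 ≠ PySem.List.pyGet? s jc.1 then mismatches + 1 else mismatches) 0

def best_alignment (genome : String) (sequence : String) : Int :=
  let g := genome.toList
  let s := sequence.toList
  let seq_length : Int := PySem.Str.len sequence
  -- fewest_mismatches starts at float('inf'): modelled as 'none' (every int is < it)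
  let r := (PySem.List.pyRange 0 (PySem.Str.len genome - seq_length + 1) 1).foldl
    (fun (st : Int × Option Int) i =>
      let window := PySem.List.slice g (some i) (some (i + seq_length))
      let mismatches := pvAMism s window
      match st.2 with
      | none => (i, some mismatches)
      | some f => if mismatches < f then (i, some mismatches) else st)
    (-1, none)
  r.1

-- ===== PORT B =====
def best_alignment_alt (genome : String) (sequence : String) : Int :=
  let g := genome.toList
  let m : Int := PySem.Str.len sequence
  let nw : Int := PySem.Str.len genome - m + 1
  if nw ≤ 0 then -1 else
  let counts0 : List Int := List.replicate nw.toNat 0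
  let counts := (PySem.List.enumerate sequence.toList 0).foldl
    (fun counts jc =>
      (PySem.List.pyRange 0 nw 1).foldl
        (fun counts i =>
          if PySem.List.pyGet? g (i + jc.1) ≠ some jc.2 then
            PySem.List.pySetD counts i (PySem.List.pyGetD counts i 0 + 1)
          else counts) counts) counts0
  (PySem.List.pyRange 1 nw 1).foldl
    (fun best i =>
      if PySem.List.pyGetD counts i 0 < PySem.List.pyGetD counts best 0 then i else best) 0

-- ===== PRECONDITION & SPEC =====
def Spec_best_alignment (genome : String) (sequence : String) (out : Int) : Prop := out = best_alignment_alt genome sequence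
instance (genome : String) (sequence : String) (out : Int) : Decidable (Spec_best_alignment genome sequence out) := by unfold Spec_best_alignment; infer_instance

-- ===== CLAIM (what is proved, stated in full; the proofs are below) =====
def Claim_equal_best_alignment : Prop := ∀ (genome : String) (sequence : String), Dom_best_alignment genome sequence → Spec_best_alignment genome sequence (best_alignment genome sequence)

-- ===== LEMMAS AND PROOFS =====

def pvF (g s : List Char) (i : Nat) : Int :=
  (((List.range s.length).countP (fun j => g.getD (i + j) 'a' ≠ s.getD j 'a') : Nat) : Int)

def pvC (g s : List Char) (nw : Nat) : List Int := (List.range nw).map (pvF g s)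

def pvScan (C : List Int) (b : Nat) (l : List Nat) : Nat :=
  l.foldl (fun b i => if C.getD i 0 < C.getD b 0 then i else b) b

def pvTarget (g s : List Char) : Int :=
  if (g.length : Int) - s.length + 1 ≤ 0 then -1
  else
    let nw := ((g.length : Int) - s.length + 1).toNat
    (pvScan (pvC g s nw) 0 ((List.range (nw - 1)).map (· + 1)) : Int)

theorem pv_set_map_range {β : Type} (f : Nat → β) (n k : Nat) (v : β) :
    ((List.range n).map f).set k v = (List.range n).map (fun i => if i = k then v else f i) := by
  apply List.ext_getElem
  · simp
  · intro i h1 h2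
    simp only [List.getElem_set, List.getElem_map, List.getElem_range]
    by_cases hik : k = i
    · subst hik; simp
    · rw [if_neg hik, if_neg (fun h => hik h.symm)]

theorem pvInner (g : List Char) (c : Char) (t nw : Nat) (base : Nat → Int)
    (hr : ∀ i, i < nw → i + t < g.length) :
    (PySem.List.pyRange 0 (nw : Int) 1).foldl
      (fun counts i => if PySem.List.pyGet? g (i + (t : Int)) ≠ some c then
          PySem.List.pySetD counts i (PySem.List.pyGetD counts i 0 + 1) else counts)
      ((List.range nw).map base)
    = (List.range nw).map (fun i => base i + if g.getD (i + t) 'a' ≠ c then 1 else 0) := by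
  rw [PySem.List.pyRange_zero_nat, List.foldl_map]
  suffices h : ∀ w, w ≤ nw →
      (List.range w).foldl
        (fun counts (k : Nat) => if PySem.List.pyGet? g ((k : Int) + (t : Int)) ≠ some c then
            PySem.List.pySetD counts (k : Int) (PySem.List.pyGetD counts (k : Int) 0 + 1) else counts)
        ((List.range nw).map base)
      = (List.range nw).map (fun i => if i < w ∧ g.getD (i + t) 'a' ≠ c then base i + 1 else base i) by
    rw [h nw le_rfl]
    apply List.map_congr_left
    intro i hi
    simp only [List.mem_range] at hi
    by_cases hc : g.getD (i + t) 'a' ≠ c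
    · rw [if_pos ⟨hi, hc⟩, if_pos hc]
    · rw [if_neg (fun hh => hc hh.2), if_neg hc, add_zero]
  intro w hw
  induction w with
  | zero => simp
  | succ w ih =>
    rw [List.range_succ, List.foldl_append, ih (by omega)]
    have hwnw : w < nw := hw
    have hgi : PySem.List.pyGet? g ((w : Int) + (t : Int)) = some (g.getD (w + t) 'a') := by
      have h2 : ((w : Int) + (t : Int)) = ((w + t : Nat) : Int) := by push_cast; ring
      rw [h2, PySem.List.pyGet?_natCast, List.getElem?_eq_getElem (hr w hwnw),
        List.getD_eq_getElem g 'a' (hr w hwnw)]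
    simp only [List.foldl_cons, List.foldl_nil, hgi]
    by_cases hc : g.getD (w + t) 'a' ≠ c
    · rw [if_pos (by simpa using hc)]
      rw [PySem.List.pyGetD_natCast, PySem.List.pySetD_natCast,
        PySem.List.getD_map_range (fun i => if i < w ∧ g.getD (i + t) 'a' ≠ c then base i + 1 else base i) nw w 0 hwnw, pv_set_map_range]
      apply List.map_congr_left
      intro i hi
      simp only [List.mem_range] at hi
      by_cases hiw : i = w
      · subst hiw
        rw [if_pos rfl, if_neg (fun hh => absurd hh.1 (by omega)), if_pos ⟨by omega, hc⟩]
      · rw [if_neg hiw]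
        by_cases h1 : i < w
        · by_cases h2 : g.getD (i + t) 'a' ≠ c
          · rw [if_pos ⟨h1, h2⟩, if_pos ⟨by omega, h2⟩]
          · rw [if_neg (fun hh => h2 hh.2), if_neg (fun hh => h2 hh.2)]
        · rw [if_neg (fun hh => h1 hh.1), if_neg (fun hh => absurd hh.1 (by omega))]
    · rw [if_neg (by simpa using hc)]
      apply List.map_congr_left
      intro i hi
      simp only [List.mem_range] at hi
      by_cases hiw : i = w
      · subst hiw
        rw [if_neg (fun hh => absurd hh.1 (by omega)), if_neg (fun hh => hc hh.2)]
      · by_cases h2 : g.getD (i + t) 'a' ≠ c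
        · by_cases h1 : i < w
          · rw [if_pos ⟨h1, h2⟩, if_pos ⟨by omega, h2⟩]
          · rw [if_neg (fun hh => h1 hh.1), if_neg (fun hh => absurd hh.1 (by omega))]
        · rw [if_neg (fun hh => h2 hh.2), if_neg (fun hh => h2 hh.2)]

theorem pvOuter (g : List Char) (nw : Nat) :
    ∀ (s' : List Char) (t : Nat) (base : Nat → Int),
    (∀ i, i < nw → ∀ j, j < s'.length → i + (t + j) < g.length) →
    (PySem.List.enumerate s' (t : Int)).foldl
      (fun counts jc =>
        (PySem.List.pyRange 0 (nw : Int) 1).foldl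
          (fun counts i =>
            if PySem.List.pyGet? g (i + jc.1) ≠ some jc.2 then
              PySem.List.pySetD counts i (PySem.List.pyGetD counts i 0 + 1)
            else counts) counts) ((List.range nw).map base)
    = (List.range nw).map (fun i =>
        base i + (((List.range s'.length).countP
          (fun j => g.getD (i + t + j) 'a' ≠ s'.getD j 'a') : Nat) : Int)) := by
  intro s'
  induction s' with
  | nil => intro t base _; simp
  | cons c s' ih =>
    intro t base hr
    rw [PySem.List.enumerate_cons, List.foldl_cons]
    rw [pvInner g c t nw base (fun i hi => by
      have := hr i hi 0 (by simp); omega)]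
    have hcast : (t : Int) + 1 = ((t + 1 : Nat) : Int) := by push_cast; ring
    rw [hcast, ih (t + 1) _ (fun i hi j hj => by
      have := hr i hi (j + 1) (by simp; omega); omega)]
    apply List.map_congr_left
    intro i hi
    simp only [List.mem_range] at hi
    rw [List.length_cons, List.range_succ_eq_map, List.countP_cons, List.countP_map]
    have h0 : (fun j => decide (g.getD (i + t + Nat.succ j) 'a' ≠ (c :: s').getD (Nat.succ j) 'a'))
        = (fun j => decide (g.getD (i + (t + 1) + j) 'a' ≠ s'.getD j 'a')) := by
      funext j
      have : i + t + Nat.succ j = i + (t + 1) + j := by omega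
      rw [this]
      rfl
    have h1 : (g.getD (i + t + 0) 'a' ≠ (c :: s').getD 0 'a') = (g.getD (i + t) 'a' ≠ c) := by
      simp
    push_cast
    rw [Function.comp_def, h0]
    simp only [List.getD_cons_zero, add_zero]
    by_cases hc : g.getD (i + t) 'a' ≠ c
    · rw [if_pos hc, if_pos (by simpa using hc)]
      ring
    · rw [if_neg hc, if_neg (by simpa using hc)]
      ring

theorem pvScanCast (C : List Int) : ∀ (l : List Nat) (b : Nat),
    l.foldl (fun (best : Int) (k : Nat) =>
        if PySem.List.pyGetD C (1 + (k : Int)) 0 < PySem.List.pyGetD C best 0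
        then 1 + (k : Int) else best) (b : Int)
    = ((l.foldl (fun b k => if C.getD (k + 1) 0 < C.getD b 0 then k + 1 else b) b : Nat) : Int) := by
  intro l
  induction l with
  | nil => intro b; rfl
  | cons k l ih =>
    intro b
    simp only [List.foldl_cons]
    have hk : (1 : Int) + (k : Int) = ((k + 1 : Nat) : Int) := by push_cast; ring
    rw [hk, PySem.List.pyGetD_natCast, PySem.List.pyGetD_natCast]
    by_cases hc : C.getD (k + 1) 0 < C.getD b 0
    · rw [if_pos hc, if_pos hc, ih]
    · rw [if_neg hc, if_neg hc, ih]

theorem pvB_eq_target (genome sequence : String) :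
    best_alignment_alt genome sequence = pvTarget genome.toList sequence.toList := by
  unfold best_alignment_alt pvTarget
  rw [PySem.Str.len_eq, PySem.Str.len_eq]
  by_cases h : (genome.toList.length : Int) - sequence.toList.length + 1 ≤ 0
  · rw [if_pos h, if_pos h]
  · rw [if_neg h, if_neg h]
    set g := genome.toList
    set s := sequence.toList
    set nwI : Int := (g.length : Int) - s.length + 1 with hnwI
    set nw : Nat := nwI.toNat with hnw
    have hnwI' : nwI = (nw : Int) := by omega
    have hrepl : List.replicate nw (0 : Int) = (List.range nw).map (fun _ => (0 : Int)) := by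
      simp
    have hout := pvOuter g nw s 0 (fun _ => (0 : Int)) (fun i hi j hj => by
      simp only [hnw, hnwI] at hi ⊢; omega)
    simp only [Nat.cast_zero] at hout
    simp only [hnwI', hrepl]
    rw [hout]
    have hC : (List.range nw).map (fun i =>
        (0 : Int) + (((List.range s.length).countP
          (fun j => g.getD (i + 0 + j) 'a' ≠ s.getD j 'a') : Nat) : Int)) = pvC g s nw := by
      unfold pvC pvF
      apply List.map_congr_left
      intro i _
      simp only [add_zero, zero_add]
    rw [hC]
    rw [PySem.List.pyRange_one 1 (nw : Int), List.foldl_map]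
    have hlen : ((nw : Int) - 1).toNat = nw - 1 := by omega
    rw [hlen]
    have hsc := pvScanCast (pvC g s nw) ((List.range (nw - 1)).map (fun k => k)) 0
    simp only [Nat.cast_zero, List.foldl_map] at hsc ⊢
    rw [hsc]
    unfold pvScan
    rw [List.foldl_map]

theorem pvAMism_fold (s : List Char) :
    ∀ (w : List Char) (t : Nat) (acc : Int), t + w.length ≤ s.length →
    (PySem.List.enumerate w (t : Int)).foldl
      (fun mismatches jc =>
        if some jc.2 ≠ PySem.List.pyGet? s jc.1 then mismatches + 1 else mismatches) acc
    = acc + (((List.range w.length).countP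
        (fun j => w.getD j 'a' ≠ s.getD (t + j) 'a') : Nat) : Int) := by
  intro w
  induction w with
  | nil => intro t acc _; simp
  | cons x w ih =>
    intro t acc hlen
    rw [PySem.List.enumerate_cons, List.foldl_cons]
    have ht : t < s.length := by simp at hlen; omega
    have hget : PySem.List.pyGet? s (t : Int) = some (s.getD t 'a') := by
      rw [PySem.List.pyGet?_natCast, List.getElem?_eq_getElem ht, List.getD_eq_getElem s 'a' ht]
    have hcast : (t : Int) + 1 = ((t + 1 : Nat) : Int) := by push_cast; ring
    rw [hget, hcast, ih (t + 1) _ (by simp at hlen ⊢; omega)]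
    rw [List.length_cons, List.range_succ_eq_map, List.countP_cons, List.countP_map]
    rw [Function.comp_def]
    have h0 : (fun j => decide ((x :: w).getD (Nat.succ j) 'a' ≠ s.getD (t + Nat.succ j) 'a'))
        = (fun j => decide (w.getD j 'a' ≠ s.getD (t + 1 + j) 'a')) := by
      funext j
      have he : t + Nat.succ j = t + 1 + j := by omega
      rw [he]
      rfl
    rw [h0]
    simp only [List.getD_cons_zero, add_zero]
    by_cases hc : x ≠ s.getD t 'a'
    · rw [if_pos (by simpa using hc)]
      have hd : (decide (x ≠ s.getD t 'a')) = true := by simpa using hc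
      rw [hd, if_pos rfl]
      push_cast; ring
    · rw [if_neg (by simpa using hc)]
      have hd : (decide (x ≠ s.getD t 'a')) = false := by simpa using hc
      rw [hd]
      simp only [Bool.false_eq_true, if_false]
      push_cast; ring

theorem pvAMism_window (g s : List Char) (k : Nat) (hk : k + s.length ≤ g.length) :
    pvAMism s ((g.drop k).take s.length) = pvF g s k := by
  have hwlen : ((g.drop k).take s.length).length = s.length := by
    simp; omega
  have h := pvAMism_fold s ((g.drop k).take s.length) 0 0 (by rw [hwlen]; omega)
  simp only [Nat.cast_zero] at h
  unfold pvAMism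
  rw [h, zero_add, hwlen, pvF]
  congr 1
  apply List.countP_congr
  intro j hj
  simp only [List.mem_range] at hj
  have hjw : j < ((g.drop k).take s.length).length := by omega
  have hkj : k + j < g.length := by omega
  have hw : ((g.drop k).take s.length).getD j 'a' = g.getD (k + j) 'a' := by
    rw [List.getD_eq_getElem _ 'a' hjw, List.getD_eq_getElem g 'a' hkj,
      List.getElem_take, List.getElem_drop]
  rw [hw]
  simp

def pvBodyC (C : List Int) (st : Int × Option Int) (k : Nat) : Int × Option Int :=
  match st.2 with
  | none => ((k : Int), some (C.getD k 0))
  | some f => if C.getD k 0 < f then ((k : Int), some (C.getD k 0)) else st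

theorem pvPairFold (C : List Int) : ∀ (l : List Nat) (b : Nat),
    l.foldl (pvBodyC C) ((b : Int), some (C.getD b 0))
    = (((pvScan C b l : Nat) : Int), some (C.getD (pvScan C b l) 0)) := by
  intro l
  induction l with
  | nil => intro b; rfl
  | cons a l ih =>
    intro b
    rw [List.foldl_cons]
    show l.foldl (pvBodyC C) (if C.getD a 0 < C.getD b 0 then ((a : Int), some (C.getD a 0))
        else ((b : Int), some (C.getD b 0))) = _
    have hscan : pvScan C b (a :: l) = pvScan C (if C.getD a 0 < C.getD b 0 then a else b) l := by
      unfold pvScan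
      rw [List.foldl_cons]
    rw [hscan]
    by_cases hc : C.getD a 0 < C.getD b 0
    · rw [if_pos hc, if_pos hc, ih]
    · rw [if_neg hc, if_neg hc, ih]

theorem pvA_eq_target (genome sequence : String) :
    best_alignment genome sequence = pvTarget genome.toList sequence.toList := by
  unfold best_alignment pvTarget
  rw [PySem.Str.len_eq, PySem.Str.len_eq]
  dsimp only
  by_cases h : (genome.toList.length : Int) - sequence.toList.length + 1 ≤ 0
  · rw [if_pos h, PySem.List.pyRange_one_eq_nil (by omega)]
    rfl
  · rw [if_neg h]
    set g := genome.toList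
    set s := sequence.toList
    set nwI : Int := (g.length : Int) - s.length + 1 with hnwI
    set nw : Nat := nwI.toNat with hnw
    have hnwI' : nwI = (nw : Int) := by omega
    have hnwpos : 0 < nw := by omega
    rw [hnwI', PySem.List.pyRange_zero_nat, List.foldl_map]
    have hcongr := PySem.List.foldl_congr_mem (List.range nw)
      (fun (st : Int × Option Int) (k : Nat) =>
        let window := PySem.List.slice g (some (k : Int)) (some ((k : Int) + (s.length : Int)))
        let mismatches := pvAMism s window
        match st.2 with
        | none => ((k : Int), some mismatches)
        | some f => if mismatches < f then ((k : Int), some mismatches) else st)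
      (pvBodyC (pvC g s nw))
      ((-1 : Int), (none : Option Int))
      (fun st k hk => by
        simp only [List.mem_range] at hk
        have hkm : k + s.length ≤ g.length := by omega
        have hwin : PySem.List.slice g (some (k : Int)) (some ((k : Int) + (s.length : Int)))
            = (g.drop k).take s.length := PySem.List.slice_natCast_add g k s.length
        have hmik : pvAMism s ((g.drop k).take s.length) = (pvC g s nw).getD k 0 := by
          rw [pvAMism_window g s k hkm, pvC, PySem.List.getD_map_range (pvF g s) nw k 0 hk]
        simp only [hwin, hmik, pvBodyC])
    rw [hcongr]
    obtain ⟨w, hw⟩ : ∃ w, nw = w + 1 := ⟨nw - 1, by omega⟩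
    rw [hw, List.range_succ_eq_map, List.foldl_cons]
    rw [show pvBodyC (pvC g s (w + 1)) ((-1 : Int), (none : Option Int)) 0
        = (((0 : Nat) : Int), some ((pvC g s (w + 1)).getD 0 0)) from rfl, pvPairFold]
    simp only [Nat.add_sub_cancel]

-- ===== VERDICT (by name: the statement is the Claim_ definition above) =====
theorem best_alignment_spec : Claim_equal_best_alignment := by
  intro genome sequence _
  unfold Spec_best_alignment
  rw [pvA_eq_target, pvB_eq_target]
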